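-- pv_equiv track=rewrite | github.com/davidyaps/programacion_1 | Trabajos prácticos/Trabajo práctico 0 - Matrices/tp00ej06.py | encontrarMayoresPorColumna
-- ===== SOURCE A (Python) =====
-- def encontrarMayoresPorColumna(matriz):
--     filas = len(matriz)
--     columnas = len(matriz[0])
--
--     mayoresPorColumna = []
--
--     for j in range(columnas):
--         mayor = matriz[0][j]
--         for i in range(1, filas):
--             if matriz[i][j] > mayor:
--                 mayor = matriz[i][j]
--         mayoresPorColumna.append(mayor)
--
--     return mayoresPorColumna
-- ===== SOURCE B (Python) =====
-- def encontrarMayoresPorColumna(matriz):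
--     columnas = len(matriz[0])
--     mayores = list(matriz[0])
--     for fila in matriz[1:]:
--         for j in range(columnas):
--             if fila[j] > mayores[j]:
--                 mayores[j] = fila[j]
--     return mayores
-- ===== Notes on version B (the rewrite author's own statement) =====
-- stated objective: alternative
-- what changed: B replaces A's column-major double scan (for each column, re-scan all rows) by a single row-major sweep maintaining a running per-column maximum vector seeded from a copy of the first row; Pre_ only excludes inputs where both programs raise IndexError (empty matrix, or a later row shorter than the first).
import Mathlib
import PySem

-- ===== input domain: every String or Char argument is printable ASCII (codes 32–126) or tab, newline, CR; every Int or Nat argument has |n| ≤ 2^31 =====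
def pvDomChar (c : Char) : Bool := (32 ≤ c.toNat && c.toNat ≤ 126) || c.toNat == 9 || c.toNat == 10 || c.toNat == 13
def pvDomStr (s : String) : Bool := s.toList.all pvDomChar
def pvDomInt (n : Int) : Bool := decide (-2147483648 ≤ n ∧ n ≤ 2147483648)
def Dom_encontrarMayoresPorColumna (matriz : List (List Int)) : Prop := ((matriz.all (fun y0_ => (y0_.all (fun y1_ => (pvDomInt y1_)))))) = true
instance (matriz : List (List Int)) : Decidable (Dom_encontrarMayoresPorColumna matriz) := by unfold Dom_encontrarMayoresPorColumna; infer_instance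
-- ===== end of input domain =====

-- B computes the per-column maxima in one row-major sweep (running-maximum vector seeded
-- from the first row) instead of A's column-major scan; same cost, different traversal.

-- ===== PORT A =====
def encontrarMayoresPorColumna (matriz : List (List Int)) : List Int :=
  let filas : Int := matriz.length
  let columnas : Int := (PySem.List.pyGetD matriz 0 []).length
  (PySem.List.pyRange 0 columnas 1).foldl (fun acc j =>
    let mayor :=
      (PySem.List.pyRange 1 filas 1).foldl (fun mayor i =>
        let v := PySem.List.pyGetD (PySem.List.pyGetD matriz i []) j 0
        if v > mayor then v else mayor)
        (PySem.List.pyGetD (PySem.List.pyGetD matriz 0 []) j 0)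
    acc ++ [mayor]) []

-- ===== PORT B =====
def encontrarMayoresPorColumna_alt (matriz : List (List Int)) : List Int :=
  let mayores0 := PySem.List.pyGetD matriz 0 []
  (matriz.drop 1).foldl (fun mayores fila =>
    mayores.zipIdx.map (fun p =>
      let v := PySem.List.pyGetD fila (p.2 : Int) 0
      if v > p.1 then v else p.1)) mayores0

-- ===== PRECONDITION & SPEC =====
-- Pre_ excludes exactly the inputs on which the Python A raises IndexError:
-- the empty matrix (matriz[0]) and matrices with a row shorter than the first row.
def Pre_encontrarMayoresPorColumna (matriz : List (List Int)) : Prop :=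
  matriz ≠ [] ∧ ∀ fila ∈ matriz, (matriz.headD []).length ≤ fila.length
instance (matriz : List (List Int)) : Decidable (Pre_encontrarMayoresPorColumna matriz) := by
  unfold Pre_encontrarMayoresPorColumna; infer_instance

def pvWitness_encontrarMayoresPorColumna : List (List Int) := [[1, 5, 2], [4, 0, 3]]

def Spec_encontrarMayoresPorColumna (matriz : List (List Int)) (out : List Int) : Prop :=
  out = encontrarMayoresPorColumna_alt matriz
instance (matriz : List (List Int)) (out : List Int) :
    Decidable (Spec_encontrarMayoresPorColumna matriz out) := by
  unfold Spec_encontrarMayoresPorColumna; infer_instance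

-- ===== CLAIM (what is proved, stated in full; the proofs are below) =====
def Claim_equal_encontrarMayoresPorColumna : Prop :=
  ∀ (matriz : List (List Int)), Dom_encontrarMayoresPorColumna matriz →
    Pre_encontrarMayoresPorColumna matriz →
    Spec_encontrarMayoresPorColumna matriz (encontrarMayoresPorColumna matriz)

-- ===== LEMMAS AND PROOFS =====

lemma map_range_getD (l : List Int) :
    (List.range l.length).map (fun k => l.getD k 0) = l := by
  apply List.ext_getElem
  · simp
  · intro i h1 h2
    simp [List.getD_eq_getElem?_getD, List.getElem?_eq_getElem h2]

-- entry-wise description of B's running-maximum fold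
lemma alt_fold_eq_map (rest : List (List Int)) :
    ∀ (mayores : List Int),
      rest.foldl (fun mayores fila =>
        mayores.zipIdx.map (fun p =>
          let v := PySem.List.pyGetD fila (p.2 : Int) 0
          if v > p.1 then v else p.1)) mayores
      = (List.range mayores.length).map (fun k =>
          rest.foldl (fun m fila =>
            let v := PySem.List.pyGetD fila (Int.ofNat k) 0
            if v > m then v else m) (mayores.getD k 0)) := by
  induction rest with
  | nil =>
      intro mayores
      simp only [List.foldl_nil]
      exact (map_range_getD mayores).symm
  | cons fila rest ih =>
      intro mayores
      rw [List.foldl_cons, ih]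
      simp only [List.length_map, List.length_zipIdx]
      apply List.map_congr_left
      intro k hk
      rw [List.mem_range] at hk
      rw [List.foldl_cons]
      congr 1
      rw [List.getD_eq_getElem _ _ (by simpa using hk),
          List.getD_eq_getElem _ _ hk]
      simp [List.getElem_zipIdx]

theorem encontrarMayoresPorColumna_spec :
    Claim_equal_encontrarMayoresPorColumna := by
  intro matriz _ hpre
  obtain ⟨hne, -⟩ := hpre
  obtain ⟨r0, rest, rfl⟩ := List.exists_cons_of_ne_nil hne
  show encontrarMayoresPorColumna (r0 :: rest) = encontrarMayoresPorColumna_alt (r0 :: rest)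
  unfold encontrarMayoresPorColumna encontrarMayoresPorColumna_alt
  rw [alt_fold_eq_map]
  simp only [PySem.List.pyGetD_zero_cons, List.drop_succ_cons, List.drop_zero,
    PySem.List.foldl_append_singleton_eq_map, List.nil_append]
  rw [PySem.List.pyRange_zero_natCast, List.map_map]
  apply List.map_congr_left
  intro k hk
  rw [List.mem_range] at hk
  simp only [Function.comp_apply]
  rw [PySem.List.foldl_pyRange_pyGetD' (r0 :: rest) ([] : List Int)
      (fun m fila => if PySem.List.pyGetD fila (↑k) 0 > m then PySem.List.pyGetD fila (↑k) 0 else m)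
      (PySem.List.pyGetD r0 (↑k) 0) (a := 1) (by norm_num)]
  simp [PySem.List.pyGetD_natCast, Int.ofNat_eq_natCast]
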